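-- pv_equiv track=rewrite | github.com/biswabrata-banerjee/connect-reports-csd | reports/subscriptions_report/utils.py | get_param_value
-- ===== SOURCE A (Python) =====
-- def get_param_value(params: list, value: str) -> str:
--     try:
--         if params[0]['id'] == value:
--             return params[0]['value']
--         if params[0]['name'] == value:
--             return params[0]['value']
--         if len(params) == 1:
--             return '-'
--         return get_param_value(list(params[1:]), value)
--     except Exception:
--         return '-'
-- ===== SOURCE B (Python) =====
-- def get_param_value(params: list, value: str) -> str:
--     try:
--         for p in params:
--             if p['id'] == value or p['name'] == value:
--                 return p['value']
--         return '-'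
--     except Exception:
--         return '-'
-- ===== Notes on version B (the rewrite author's own statement) =====
-- stated objective: simpler
-- what changed: Replaces per-element recursion with its own try/except frame at every level by a single flat for-loop over params wrapped in one try/except, with the id/name checks merged into one short-circuit condition.
import Mathlib
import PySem

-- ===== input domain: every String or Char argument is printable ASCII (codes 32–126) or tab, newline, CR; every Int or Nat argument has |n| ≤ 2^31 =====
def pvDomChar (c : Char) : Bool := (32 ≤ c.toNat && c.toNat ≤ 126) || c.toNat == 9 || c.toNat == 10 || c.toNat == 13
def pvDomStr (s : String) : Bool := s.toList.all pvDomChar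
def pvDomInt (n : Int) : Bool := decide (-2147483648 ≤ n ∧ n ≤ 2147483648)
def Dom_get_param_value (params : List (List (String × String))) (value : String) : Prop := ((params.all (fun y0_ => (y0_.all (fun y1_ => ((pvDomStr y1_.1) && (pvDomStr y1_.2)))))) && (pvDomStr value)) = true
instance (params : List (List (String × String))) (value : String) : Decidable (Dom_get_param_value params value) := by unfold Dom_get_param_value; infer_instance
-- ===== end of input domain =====

-- B replaces A's per-element recursion (one try/except per level) with a single flat loop under one try/except; simpler, same values.
-- ===== PORT A =====
-- dict lookup p[k]: first match in the association list; none = KeyError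
def pvLookup (p : List (String × String)) (k : String) : Option String :=
  PySem.Dict.get? (PySem.Dict.mk p) k

-- literal transliteration of A: head checks, per-frame try/except (any missing key -> "-"), recursion on the tail
def get_param_value (params : List (List (String × String))) (value : String) : String :=
  match params with
  | [] => "-"  -- params[0] raises IndexError, caught -> "-"
  | p :: rest =>
    match pvLookup p "id" with
    | none => "-"
    | some iv =>
      if iv = value then
        match pvLookup p "value" with
        | none => "-"
        | some v => v
      else
        match pvLookup p "name" with
        | none => "-"
        | some nv =>
          if nv = value then
            match pvLookup p "value" with
            | none => "-"
            | some v => v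
          else if rest = [] then "-"  -- len(params) == 1
          else get_param_value rest value

-- ===== PORT B =====
-- one loop-body step of B: ok (some v) = return v, ok none = continue, error = exception escaping the loop
def altStep (p : List (String × String)) (value : String) : Except Unit (Option String) :=
  match pvLookup p "id" with
  | none => .error ()
  | some iv =>
    if iv = value then
      match pvLookup p "value" with
      | none => .error ()
      | some v => .ok (some v)
    else
      match pvLookup p "name" with
      | none => .error ()
      | some nv =>
        if nv = value then
          match pvLookup p "value" with
          | none => .error ()
          | some v => .ok (some v)
        else .ok none

-- the for-loop: first step that returns or raises decides; falling off the loop yields ok none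
def altLoop (params : List (List (String × String))) (value : String) : Except Unit (Option String) :=
  match params with
  | [] => .ok none
  | p :: rest =>
    match altStep p value with
    | .ok none => altLoop rest value
    | r => r

-- the single try/except around the whole loop
def get_param_value_alt (params : List (List (String × String))) (value : String) : String :=
  match altLoop params value with
  | .ok (some v) => v
  | .ok none => "-"
  | .error _ => "-"

-- ===== PRECONDITION & SPEC =====
def Spec_get_param_value (params : List (List (String × String))) (value : String) (out : String) : Prop := out = get_param_value_alt params value
instance (params : List (List (String × String))) (value : String) (out : String) : Decidable (Spec_get_param_value params value out) := by unfold Spec_get_param_value; infer_instance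

-- ===== CLAIM (what is proved, stated in full; the proofs are below) =====
def Claim_equal_get_param_value : Prop := ∀ (params : List (List (String × String))) (value : String), Dom_get_param_value params value → Spec_get_param_value params value (get_param_value params value)

-- ===== LEMMAS AND PROOFS =====

-- ===== VERDICT (by name: the statement is the Claim_ definition above) =====
lemma equiv_aux (params : List (List (String × String))) (value : String) :
    get_param_value params value = get_param_value_alt params value := by
  induction params with
  | nil => rfl
  | cons p rest ih =>
    simp only [get_param_value, get_param_value_alt, altLoop, altStep]
    rcases h1 : pvLookup p "id" with _ | iv
    · rfl
    · by_cases hiv : iv = value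
      · simp only [hiv, if_pos rfl]
        rcases pvLookup p "value" with _ | v <;> rfl
      · simp only [if_neg hiv]
        rcases pvLookup p "name" with _ | nv
        · rfl
        · by_cases hnv : nv = value
          · simp only [hnv, if_pos rfl]
            rcases pvLookup p "value" with _ | v <;> rfl
          · simp only [if_neg hnv]
            rcases hr : rest with _ | ⟨q, rest'⟩
            · rfl
            · rw [hr] at ih; rw [ih]; rfl

theorem get_param_value_spec : Claim_equal_get_param_value := by
  intro params value _
  unfold Spec_get_param_value
  exact equiv_aux params value
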